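-- pv_equiv track=rewrite | github.com/srikur/AutoStaveDetection | python/AutoStaveDetection.py | _group_peaks_into_staves
-- ===== SOURCE A (Python) =====
-- def _group_peaks_into_staves(peaks, troughs):
--     staffs = []
--     for i, peak in enumerate(peaks[:-1]):
--         next_peak = peaks[i + 1]
--         trough_indices = [j for j, tr in enumerate(troughs) if peak < tr < next_peak]
--         if len(trough_indices) == 1:
--             trough = troughs[trough_indices[0]]
--             staffs.append((peak, trough, next_peak))
--     return staffs
-- ===== SOURCE B (Python) =====
-- # B: sort the troughs once and binary-search (bisect) each peak interval,
-- # instead of scanning the whole trough list for every pair of consecutive peaks.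
-- # _bisect_left/_bisect_right are CPython's bisect.bisect_left/bisect_right
-- # algorithm written out (the original module imports nothing, so bisect is not imported).
--
-- def _bisect_left(s, x):
--     lo, hi = 0, len(s)
--     while lo < hi:
--         mid = (lo + hi) // 2
--         if s[mid] < x:
--             lo = mid + 1
--         else:
--             hi = mid
--     return lo
--
--
-- def _bisect_right(s, x):
--     lo, hi = 0, len(s)
--     while lo < hi:
--         mid = (lo + hi) // 2
--         if x < s[mid]:
--             hi = mid
--         else:
--             lo = mid + 1
--     return lo
--
--
-- def _group_peaks_into_staves(peaks, troughs):
--     srt = sorted(troughs)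
--     staffs = []
--     for i in range(len(peaks) - 1):
--         peak = peaks[i]
--         next_peak = peaks[i + 1]
--         lo = _bisect_right(srt, peak)
--         hi = _bisect_left(srt, next_peak)
--         if hi - lo == 1:
--             staffs.append((peak, srt[lo], next_peak))
--     return staffs
-- ===== Notes on version B (the rewrite author's own statement) =====
-- stated objective: faster
-- what changed: Instead of scanning the whole trough list for every pair of consecutive peaks, B sorts the troughs once and uses binary search (bisect) to count the troughs strictly inside each peak interval and to fetch the unique one.
import Mathlib
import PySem

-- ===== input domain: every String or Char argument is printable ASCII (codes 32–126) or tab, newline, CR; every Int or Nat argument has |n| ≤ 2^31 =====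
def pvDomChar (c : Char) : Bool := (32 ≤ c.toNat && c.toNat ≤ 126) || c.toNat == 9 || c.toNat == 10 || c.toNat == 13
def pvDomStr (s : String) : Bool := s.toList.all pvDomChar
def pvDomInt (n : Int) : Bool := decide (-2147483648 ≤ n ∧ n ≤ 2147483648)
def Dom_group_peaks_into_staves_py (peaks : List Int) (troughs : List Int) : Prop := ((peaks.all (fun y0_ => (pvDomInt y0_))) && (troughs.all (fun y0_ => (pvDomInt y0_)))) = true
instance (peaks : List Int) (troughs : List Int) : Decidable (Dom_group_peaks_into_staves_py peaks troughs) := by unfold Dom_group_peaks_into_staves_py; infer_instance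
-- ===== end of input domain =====

-- B sorts the troughs once and binary-searches each peak interval instead of rescanning
-- the trough list per pair of consecutive peaks (objective: faster).

-- ===== PORT A =====
def group_peaks_into_staves_py (peaks : List Int) (troughs : List Int) : List (List Int) :=
  (PySem.List.enumerate (PySem.List.slice peaks none (some (-1)))).foldl
    (fun staffs ip =>
      let peak := ip.2
      -- peaks[i + 1]: i ranges over peaks[:-1], so i + 1 is always in range (never raises)
      let next_peak := PySem.List.pyGetD peaks (ip.1 + 1) 0
      let trough_indices : List Int :=
        ((PySem.List.enumerate troughs).filter
          (fun jt => decide (peak < jt.2 ∧ jt.2 < next_peak))).map (fun jt => jt.1)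
      if trough_indices.length == 1 then
        -- troughs[trough_indices[0]]: the index comes from enumerate(troughs), so it is in range
        let trough := PySem.List.pyGetD troughs (trough_indices.headD 0) 0
        staffs ++ [[peak, trough, next_peak]]
      else staffs) []

-- ===== PORT B =====
-- Source B's _bisect_left/_bisect_right are CPython's bisect.bisect_left/bisect_right written
-- out (the original module imports nothing); ported as the prelude's exact primitives
-- PySem.List.bisectLeft / PySem.List.bisectRight.
def group_peaks_into_staves_py_alt (peaks : List Int) (troughs : List Int) : List (List Int) :=
  let srt := PySem.List.sorted troughs (fun t => t)
  -- range(len(peaks) - 1): empty when len(peaks) ≤ 1, exactly as Nat subtraction gives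
  (List.range (peaks.length - 1)).foldl
    (fun staffs i =>
      let peak := peaks.getD i 0            -- peaks[i]: i < len - 1, in range
      let next_peak := peaks.getD (i + 1) 0 -- peaks[i + 1]: in range
      let lo := PySem.List.bisectRight srt peak
      let hi := PySem.List.bisectLeft srt next_peak
      if ((hi : Int) - (lo : Int)) == 1 then
        staffs ++ [[peak, srt.getD lo 0, next_peak]]  -- srt[lo]: lo < hi ≤ len srt, in range
      else staffs) []

-- ===== PRECONDITION & SPEC =====
def Spec_group_peaks_into_staves_py (peaks : List Int) (troughs : List Int) (out : List (List Int)) : Prop := out = group_peaks_into_staves_py_alt peaks troughs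
instance (peaks : List Int) (troughs : List Int) (out : List (List Int)) : Decidable (Spec_group_peaks_into_staves_py peaks troughs out) := by unfold Spec_group_peaks_into_staves_py; infer_instance

-- ===== CLAIM (what is proved, stated in full; the proofs are below) =====
def Claim_equal_group_peaks_into_staves_py : Prop := ∀ (peaks : List Int) (troughs : List Int), Dom_group_peaks_into_staves_py peaks troughs → Spec_group_peaks_into_staves_py peaks troughs (group_peaks_into_staves_py peaks troughs)

-- ===== LEMMAS AND PROOFS =====

-- the two loop bodies, named so the proofs can speak about them (rfl-equal to the ports' lambdas)
def pvStepA (peaks troughs : List Int) : List (List Int) → (Int × Int) → List (List Int) :=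
  fun staffs ip =>
    let peak := ip.2
    let next_peak := PySem.List.pyGetD peaks (ip.1 + 1) 0
    let trough_indices : List Int :=
      ((PySem.List.enumerate troughs).filter
        (fun jt => decide (peak < jt.2 ∧ jt.2 < next_peak))).map (fun jt => jt.1)
    if trough_indices.length == 1 then
      let trough := PySem.List.pyGetD troughs (trough_indices.headD 0) 0
      staffs ++ [[peak, trough, next_peak]]
    else staffs

def pvStepB (peaks troughs : List Int) : List (List Int) → Nat → List (List Int) :=
  fun staffs i =>
    let srt := PySem.List.sorted troughs (fun t => t)
    let peak := peaks.getD i 0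
    let next_peak := peaks.getD (i + 1) 0
    let lo := PySem.List.bisectRight srt peak
    let hi := PySem.List.bisectLeft srt next_peak
    if ((hi : Int) - (lo : Int)) == 1 then
      staffs ++ [[peak, srt.getD lo 0, next_peak]]
    else staffs

lemma pvA_eq (peaks troughs : List Int) :
    group_peaks_into_staves_py peaks troughs =
      (PySem.List.enumerate (PySem.List.slice peaks none (some (-1)))).foldl
        (pvStepA peaks troughs) [] := rfl

lemma pvB_eq (peaks troughs : List Int) :
    group_peaks_into_staves_py_alt peaks troughs =
      (List.range (peaks.length - 1)).foldl (pvStepB peaks troughs) [] := rfl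

lemma pv_slice_neg_one (xs : List Int) :
    PySem.List.slice xs none (some (-1)) = xs.dropLast := by
  simp [PySem.List.slice, PySem.List.clampIdx]
  rw [List.dropLast_eq_take]
  by_cases hxs : xs = []
  · simp [hxs]
  · rw [if_neg hxs]
    congr 1
    omega

lemma pv_enum_eq (xs : List Int) (s : Int) :
    PySem.List.enumerate xs s
      = (List.range xs.length).map (fun (i : Nat) => (s + (i : Int), xs.getD i 0)) := by
  induction xs generalizing s with
  | nil => simp [PySem.List.enumerate]
  | cons x t ih =>
    rw [show PySem.List.enumerate (x :: t) s = (s, x) :: PySem.List.enumerate t (s + 1) from rfl,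
        ih]
    rw [List.length_cons, List.range_succ_eq_map, List.map_cons, List.map_map]
    congr 1
    · simp
    · apply List.map_congr_left
      intro i _
      simp only [Function.comp, List.getD_cons_succ, Prod.mk.injEq]
      exact ⟨by push_cast; ring, trivial⟩

lemma pv_enum0_eq (xs : List Int) :
    PySem.List.enumerate xs
      = (List.range xs.length).map (fun (i : Nat) => ((i : Int), xs.getD i 0)) := by
  rw [pv_enum_eq]
  simp

lemma pv_idxfilter_map (xs : List Int) (q : Int → Bool) :
    ((List.range xs.length).filter (fun i => q (xs.getD i 0))).map (fun i => xs.getD i 0)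
      = xs.filter q := by
  induction xs with
  | nil => simp
  | cons x t ih =>
    have hshift :
        List.filter (fun i => q ((x :: t).getD i 0)) (List.map Nat.succ (List.range t.length))
          = List.map Nat.succ (List.filter (fun i => q (t.getD i 0)) (List.range t.length)) := by
      rw [List.filter_map]
      exact congrArg (List.map Nat.succ) (List.filter_congr (fun j _ => rfl))
    rw [List.length_cons, List.range_succ_eq_map, List.filter_cons, List.filter_cons]
    by_cases hq : q x = true
    · rw [if_pos (show q ((x :: t).getD 0 0) = true by simpa using hq), if_pos hq,
          List.map_cons, hshift, List.map_map, ← ih]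
      rw [List.cons_eq_cons]
      refine ⟨rfl, ?_⟩
      apply List.map_congr_left
      intro j _
      rfl
    · rw [if_neg (show ¬ q ((x :: t).getD 0 0) = true by simpa using hq), if_neg hq,
          hshift, List.map_map, ← ih]
      apply List.map_congr_left
      intro j _
      rfl

lemma pv_idxfilter_len (xs : List Int) (q : Int → Bool) :
    ((List.range xs.length).filter (fun i => q (xs.getD i 0))).length = xs.countP q := by
  have h := congrArg List.length (pv_idxfilter_map xs q)
  rw [List.length_map] at h
  rw [h, List.countP_eq_length_filter]

lemma pv_countP_between (s : List Int) (q : Int → Bool) (lo hi : Nat)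
    (hhi : hi ≤ s.length)
    (h : ∀ j, j < s.length → (q (s.getD j 0) = true ↔ (lo ≤ j ∧ j < hi))) :
    s.countP q = hi - lo := by
  induction s generalizing lo hi with
  | nil =>
    simp at hhi
    simp [hhi]
  | cons x t ih =>
    have h0 := h 0 (by simp)
    simp only [List.getD_cons_zero] at h0
    have ht : ∀ j, j < t.length → (q (t.getD j 0) = true ↔ (lo - 1 ≤ j ∧ j < hi - 1)) := by
      intro j hj
      have := h (j + 1) (by simp; omega)
      simp only [List.getD_cons_succ] at this
      rw [this]
      omega
    have hrec := ih (lo - 1) (hi - 1) (by simp at hhi; omega) ht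
    rw [List.countP_cons, hrec]
    by_cases hx : q x = true
    · have := h0.mp hx
      simp [hx]
      omega
    · have : ¬ (lo ≤ 0 ∧ 0 < hi) := fun hc => hx (h0.mpr hc)
      simp [hx]
      omega

lemma pv_count_pair (troughs : List Int) (a b : Int) :
    troughs.countP (fun t => decide (a < t ∧ t < b)) =
      PySem.List.bisectLeft (PySem.List.sorted troughs (fun t => t)) b
        - PySem.List.bisectRight (PySem.List.sorted troughs (fun t => t)) a := by
  have hpw := PySem.List.sorted_pairwise troughs (fun t => t)
  have hperm := PySem.List.sorted_perm troughs (fun t => t) false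
  obtain ⟨hL1, hL2, hL3⟩ :=
    PySem.List.bisectLeft_spec (PySem.List.sorted troughs (fun t => t)) b hpw
  obtain ⟨hR1, hR2, hR3⟩ :=
    PySem.List.bisectRight_spec (PySem.List.sorted troughs (fun t => t)) a hpw
  rw [← hperm.countP_eq]
  apply pv_countP_between _ _ _ _ hL1
  intro j hj
  rw [List.getD_eq_getElem _ _ hj]
  simp only [decide_eq_true_eq]
  constructor
  · rintro ⟨ha, hb⟩
    constructor
    · by_contra hc
      exact absurd ha (not_lt.mpr (hR2 j hj (by omega)))
    · by_contra hc
      exact absurd hb (not_lt.mpr (hL3 j hj (by omega)))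
  · rintro ⟨h1, h2⟩
    exact ⟨hR3 j hj h1, hL2 j hj h2⟩

lemma pv_filter_pair (troughs : List Int) (a b : Int)
    (h1 : troughs.countP (fun t => decide (a < t ∧ t < b)) = 1) :
    troughs.filter (fun t => decide (a < t ∧ t < b)) =
      [(PySem.List.sorted troughs (fun t => t)).getD
        (PySem.List.bisectRight (PySem.List.sorted troughs (fun t => t)) a) 0] := by
  set s := PySem.List.sorted troughs (fun t => t) with hs
  set q : Int → Bool := fun t => decide (a < t ∧ t < b) with hqdef
  set lo := PySem.List.bisectRight s a with hlo
  set hi := PySem.List.bisectLeft s b with hhi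
  have hpw := PySem.List.sorted_pairwise troughs (fun t => t)
  have hperm := PySem.List.sorted_perm troughs (fun t => t) false
  obtain ⟨hL1, hL2, hL3⟩ := PySem.List.bisectLeft_spec s b hpw
  obtain ⟨hR1, hR2, hR3⟩ := PySem.List.bisectRight_spec s a hpw
  have hcnt : hi - lo = 1 := by rw [← pv_count_pair troughs a b, h1]
  have hlt : lo < s.length := by omega
  have hq : q s[lo] = true := by
    simp only [hqdef, decide_eq_true_eq]
    exact ⟨hR3 lo hlt le_rfl, hL2 lo hlt (by omega)⟩
  have hlen : (s.filter q).length = 1 := by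
    rw [← List.countP_eq_length_filter, hperm.countP_eq, h1]
  obtain ⟨w, hw⟩ := List.length_eq_one_iff.mp hlen
  have hmem : s[lo] ∈ s.filter q := List.mem_filter.mpr ⟨List.getElem_mem hlt, hq⟩
  rw [hw] at hmem
  simp at hmem
  have hperm2 : (s.filter q).Perm (troughs.filter q) := hperm.filter q
  rw [hw] at hperm2
  have hts : troughs.filter q = [w] := List.perm_singleton.mp hperm2.symm
  rw [hts, List.getD_eq_getElem _ _ hlt, ← hmem]

lemma pv_henum (troughs : List Int) (a b : Int) :
    ((PySem.List.enumerate troughs).filter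
        (fun jt => decide (a < jt.2 ∧ jt.2 < b))).map (fun jt => jt.1)
      = ((List.range troughs.length).filter
          (fun j => decide (a < troughs.getD j 0 ∧ troughs.getD j 0 < b))).map
          (Nat.cast : Nat → Int) := by
  rw [pv_enum0_eq, List.filter_map, List.map_map]
  rfl

lemma pv_alen (troughs : List Int) (a b : Int) :
    (((PySem.List.enumerate troughs).filter
        (fun jt => decide (a < jt.2 ∧ jt.2 < b))).map (fun jt => jt.1)).length
      = troughs.countP (fun t => decide (a < t ∧ t < b)) := by
  rw [pv_henum, List.length_map]
  exact pv_idxfilter_len troughs (fun t => decide (a < t ∧ t < b))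

lemma pv_aval (troughs : List Int) (a b : Int)
    (hc : troughs.countP (fun t => decide (a < t ∧ t < b)) = 1) :
    PySem.List.pyGetD troughs
        ((((PySem.List.enumerate troughs).filter
            (fun jt => decide (a < jt.2 ∧ jt.2 < b))).map (fun jt => jt.1)).headD 0) 0
      = (PySem.List.sorted troughs (fun t => t)).getD
          (PySem.List.bisectRight (PySem.List.sorted troughs (fun t => t)) a) 0 := by
  rw [pv_henum]
  have hlen1 :
      ((List.range troughs.length).filter
        (fun j => decide (a < troughs.getD j 0 ∧ troughs.getD j 0 < b))).length = 1 := by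
    rw [pv_idxfilter_len troughs (fun t => decide (a < t ∧ t < b))]
    exact hc
  obtain ⟨j0, hj0⟩ := List.length_eq_one_iff.mp hlen1
  have hmap := pv_idxfilter_map troughs (fun t => decide (a < t ∧ t < b))
  rw [hj0] at hmap
  rw [pv_filter_pair troughs a b hc] at hmap
  simp only [List.map_cons, List.map_nil] at hmap
  have hj0v : troughs.getD j0 0 =
      (PySem.List.sorted troughs (fun t => t)).getD
        (PySem.List.bisectRight (PySem.List.sorted troughs (fun t => t)) a) 0 := by
    injection hmap
  rw [hj0]
  simp only [List.map_cons, List.map_nil, List.headD_cons]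
  rw [PySem.List.pyGetD_natCast, hj0v]

lemma pv_step_eq (peaks troughs : List Int) (i : Nat) (hI : i + 1 < peaks.length)
    (acc : List (List Int)) :
    pvStepA peaks troughs acc ((i : Int), peaks.dropLast.getD i 0)
      = pvStepB peaks troughs acc i := by
  have hpk : peaks.dropLast.getD i 0 = peaks.getD i 0 := by
    rw [List.getD_eq_getElem _ _ (by rw [List.length_dropLast]; omega),
        List.getD_eq_getElem _ _ (by omega)]
    exact List.getElem_dropLast _
  have hnext : PySem.List.pyGetD peaks ((i : Int) + 1) 0 = peaks.getD (i + 1) 0 := by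
    rw [show ((i : Int) + 1) = ((i + 1 : Nat) : Int) by push_cast; ring]
    rw [PySem.List.pyGetD_natCast]
  simp only [pvStepA, pvStepB]
  rw [hpk, hnext]
  have hcount := pv_count_pair troughs (peaks.getD i 0) (peaks.getD (i + 1) 0)
  rw [pv_alen troughs (peaks.getD i 0) (peaks.getD (i + 1) 0)]
  by_cases hc : troughs.countP
      (fun t => decide (peaks.getD i 0 < t ∧ t < peaks.getD (i + 1) 0)) = 1
  · rw [if_pos (show (troughs.countP
        (fun t => decide (peaks.getD i 0 < t ∧ t < peaks.getD (i + 1) 0)) == 1) = true by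
          simp only [beq_iff_eq]; exact hc)]
    rw [if_pos (show ((((PySem.List.bisectLeft (PySem.List.sorted troughs (fun t => t))
          (peaks.getD (i + 1) 0) : Nat) : Int)
          - ((PySem.List.bisectRight (PySem.List.sorted troughs (fun t => t))
          (peaks.getD i 0) : Nat) : Int)) == 1) = true by
        simp only [beq_iff_eq]
        omega)]
    rw [pv_aval troughs (peaks.getD i 0) (peaks.getD (i + 1) 0) hc]
  · rw [if_neg (show ¬ (troughs.countP
        (fun t => decide (peaks.getD i 0 < t ∧ t < peaks.getD (i + 1) 0)) == 1) = true by
          simp only [beq_iff_eq]; exact hc)]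
    rw [if_neg (show ¬ ((((PySem.List.bisectLeft (PySem.List.sorted troughs (fun t => t))
          (peaks.getD (i + 1) 0) : Nat) : Int)
          - ((PySem.List.bisectRight (PySem.List.sorted troughs (fun t => t))
          (peaks.getD i 0) : Nat) : Int)) == 1) = true by
        simp only [beq_iff_eq]
        intro hEq
        apply hc
        rw [hcount]
        omega)]

-- ===== VERDICT (by name: the statement is the Claim_ definition above) =====
theorem group_peaks_into_staves_py_spec : Claim_equal_group_peaks_into_staves_py := by
  intro peaks troughs _
  unfold Spec_group_peaks_into_staves_py
  rw [pvA_eq, pvB_eq, pv_slice_neg_one, pv_enum0_eq, List.length_dropLast]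
  have key : ∀ m, m ≤ peaks.length - 1 → ∀ acc,
      ((List.range m).map (fun (i : Nat) => ((i : Int), peaks.dropLast.getD i 0))).foldl
          (pvStepA peaks troughs) acc
        = (List.range m).foldl (pvStepB peaks troughs) acc := by
    intro m
    induction m with
    | zero => intro _ acc; simp
    | succ k ih =>
      intro hk acc
      rw [List.range_succ, List.map_append, List.foldl_append, List.foldl_append]
      rw [ih (by omega) acc]
      simp only [List.map_cons, List.map_nil, List.foldl_cons, List.foldl_nil]
      exact pv_step_eq peaks troughs k (by omega) _
  exact key (peaks.length - 1) le_rfl []
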